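-- pv_equiv track=rewrite | github.com/tormobr/Project-euler | 005/p5.py | hax
-- ===== SOURCE A (Python) =====
-- def is_prime(n):
--     for i in range(2, n):
--         if n % i == 0:
--             return False
--     return True
--
-- def hax(n):
--     factors = []
--     res = 1
--     for i in range(2, n):
--         if(is_prime(i)):
--             x = i
--             while x*i <= n:
--                 x *= i
--             res *= x
--
--     return res
-- ===== SOURCE B (Python) =====
-- def hax(n):
--     if n <= 2:
--         return 1
--     sieve = [True] * n
--     for p in range(2, n):
--         for m in range(2 * p, n, p):
--             sieve[m] = False
--     res = 1
--     for p in range(2, n):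
--         if sieve[p]:
--             x = p
--             while x * p <= n:
--                 x *= p
--             res *= x
--     return res
-- ===== Notes on version B (the rewrite author's own statement) =====
-- stated objective: faster
-- what changed: B replaces A's per-number trial-division primality test (is_prime scans every candidate divisor up to i for each i) with a single multiples-marking sieve built once over [2, n), then multiplies the highest powers of the surviving primes in the same way.
import Mathlib
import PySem

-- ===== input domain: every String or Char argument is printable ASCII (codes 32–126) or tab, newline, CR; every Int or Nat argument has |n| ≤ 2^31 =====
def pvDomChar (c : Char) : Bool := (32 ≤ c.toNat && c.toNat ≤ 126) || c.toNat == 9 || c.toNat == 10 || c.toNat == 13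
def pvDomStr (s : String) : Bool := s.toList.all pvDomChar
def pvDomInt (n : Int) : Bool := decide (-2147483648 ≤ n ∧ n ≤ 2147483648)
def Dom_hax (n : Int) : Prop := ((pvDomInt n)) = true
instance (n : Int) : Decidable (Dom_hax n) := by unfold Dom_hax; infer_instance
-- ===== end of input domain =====

-- B replaces A's per-number trial-division primality test by a multiples-marking sieve
-- built once (objective: faster, asymptotic).

-- ===== PORT A =====
-- is_prime: 'for i in range(2, n): if n % i == 0: return False / return True'
def isPrimeLoop (n : Int) : List Int → Bool
  | [] => true
  | i :: rest => if PySem.Int.mod n i == 0 then false else isPrimeLoop n rest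

def is_prime (n : Int) : Bool := isPrimeLoop n (PySem.List.pyRange 2 n 1)

-- 'x = i; while x*i <= n: x *= i' — the '2 ≤ i ∧ 1 ≤ x' conjuncts only make the
-- recursion total; they hold at every call site (i comes from range(2, n)).
def powLoop (n i x : Int) : Int :=
  if h : x * i ≤ n ∧ 2 ≤ i ∧ 1 ≤ x then powLoop n i (x * i) else x
  termination_by (n + 1 - x).toNat
  decreasing_by
    obtain ⟨h1, h2, h3⟩ := h
    have : x + 1 ≤ x * i := by nlinarith
    omega

def hax (n : Int) : Int :=
  (PySem.List.pyRange 2 n 1).foldl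
    (fun res i => if is_prime i then res * powLoop n i i else res) 1

-- ===== PORT B =====
-- transliteration of Source B: allocate sieve = [True]*n, strike every multiple 2p,3p,…
-- of every p in range(2,n), then multiply the highest powers of the surviving p.
-- sieve[p] is read as getD p.toNat false: p is in range(2,n), so the index is in bounds
-- and the default is never used (exact as Python's sieve[p]).
def hax_alt (n : Int) : Int :=
  if n ≤ 2 then 1
  else
    let sieve :=
      (PySem.List.pyRange 2 n 1).foldl
        (fun s p =>
          (PySem.List.pyRange (2 * p) n p).foldl (fun s m => s.set m.toNat false) s)
        (List.replicate n.toNat true)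
    (PySem.List.pyRange 2 n 1).foldl
      (fun res p => if sieve.getD p.toNat false then res * powLoop n p p else res) 1

-- ===== PRECONDITION & SPEC =====
def Spec_hax (n : Int) (out : Int) : Prop := out = hax_alt n
instance (n : Int) (out : Int) : Decidable (Spec_hax n out) := by unfold Spec_hax; infer_instance

-- ===== CLAIM (what is proved, stated in full; the proofs are below) =====
def Claim_equal_hax : Prop := ∀ (n : Int), Dom_hax n → Spec_hax n (hax n)

-- ===== LEMMAS AND PROOFS =====

-- A's primality loop returns true iff no element of the list divides n.
theorem isPrimeLoop_eq_true_iff (n : Int) (l : List Int) :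
    isPrimeLoop n l = true ↔ ∀ i ∈ l, ¬ (i ∣ n) := by
  induction l with
  | nil => simp [isPrimeLoop]
  | cons i rest ih =>
    simp only [isPrimeLoop]
    by_cases h : PySem.Int.mod n i = 0
    · simp only [if_pos (beq_iff_eq.mpr h), Bool.false_eq_true, false_iff]
      intro hall
      exact hall i (List.mem_cons_self) ((PySem.Int.mod_eq_zero_iff_dvd n i).mp h)
    · rw [if_neg (fun hb => h (beq_iff_eq.mp hb)), ih]
      constructor
      · rintro hall j hj
        rcases List.mem_cons.mp hj with rfl | hj'
        · exact fun hd => h ((PySem.Int.mod_eq_zero_iff_dvd n j).mpr hd)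
        · exact hall j hj'
      · intro hall j hj
        exact hall j (List.mem_cons_of_mem _ hj)

theorem map_const_false (s : List Bool) (j : Nat) :
    s[j]?.map (fun _ => false) = if j < s.length then some false else none := by
  by_cases hl : j < s.length
  · simp [hl]
  · simp [hl]

-- one marking pass: getElem? after striking every index of l
theorem foldl_set_getElem? (l : List Int) (s : List Bool) (j : Nat) :
    (l.foldl (fun s m => s.set m.toNat false) s)[j]? =
      if l.any (fun m => m.toNat == j) then s[j]?.map (fun _ => false) else s[j]? := by
  induction l generalizing s with
  | nil => simp
  | cons m rest ih =>
    rw [List.foldl_cons, ih, List.any_cons]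
    have hlen : (s.set m.toNat false).length = s.length := List.length_set ..
    by_cases hm : m.toNat = j
    · rw [beq_iff_eq.mpr hm, Bool.true_or, if_pos rfl]
      by_cases hr : rest.any (fun m' => m'.toNat == j) = true
      · rw [if_pos hr, map_const_false, map_const_false, hlen]
      · rw [if_neg hr, List.getElem?_set, if_pos hm, hm, map_const_false]
    · have hb : (m.toNat == j) = false := beq_eq_false_iff_ne.mpr hm
      rw [hb, Bool.false_or]
      by_cases hr : rest.any (fun m' => m'.toNat == j) = true
      · rw [if_pos hr, if_pos hr, map_const_false, map_const_false, hlen]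
      · rw [if_neg hr, if_neg hr, List.getElem?_set, if_neg hm]

-- the whole sieve-building fold
theorem sieve_getElem? (n : Int) (ps : List Int) (s : List Bool) (j : Nat) :
    (ps.foldl
        (fun s p => (PySem.List.pyRange (2 * p) n p).foldl (fun s m => s.set m.toNat false) s)
        s)[j]? =
      if ps.any (fun p => (PySem.List.pyRange (2 * p) n p).any (fun m => m.toNat == j)) then
        s[j]?.map (fun _ => false)
      else s[j]? := by
  induction ps generalizing s with
  | nil => simp
  | cons p rest ih =>
    rw [List.foldl_cons, ih, List.any_cons]
    have hlen : ∀ (t : List Bool),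
        ((PySem.List.pyRange (2 * p) n p).foldl (fun s m => s.set m.toNat false) t).length
          = t.length := by
      intro t
      induction PySem.List.pyRange (2 * p) n p generalizing t with
      | nil => rfl
      | cons m ms ihm => rw [List.foldl_cons, ihm, List.length_set]
    by_cases hp : (PySem.List.pyRange (2 * p) n p).any (fun m => m.toNat == j) = true
    · rw [hp, Bool.true_or, if_pos rfl]
      by_cases hr : rest.any (fun p' => (PySem.List.pyRange (2 * p') n p').any (fun m => m.toNat == j)) = true
      · rw [if_pos hr, map_const_false, map_const_false, hlen s]
      · rw [if_neg hr, foldl_set_getElem?, if_pos hp]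
    · rw [Bool.not_eq_true] at hp
      rw [hp, Bool.false_or]
      by_cases hr : rest.any (fun p' => (PySem.List.pyRange (2 * p') n p').any (fun m => m.toNat == j)) = true
      · rw [if_pos hr, if_pos hr, map_const_false, map_const_false, hlen s]
      · rw [if_neg hr, if_neg hr, foldl_set_getElem?, if_neg (by simp [hp])]

-- arithmetic bridge: "p is struck by the sieve" ↔ "p has a proper divisor ≥ 2"
theorem struck_iff (n p : Int) (h2 : 2 ≤ p) (hn : p < n) :
    (∃ q ∈ PySem.List.pyRange 2 n 1, ∃ m ∈ PySem.List.pyRange (2 * q) n q, m.toNat = p.toNat) ↔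
      ∃ i, 2 ≤ i ∧ i < p ∧ i ∣ p := by
  constructor
  · rintro ⟨q, hq, m, hm, he⟩
    rw [PySem.List.mem_pyRange_one] at hq
    rw [PySem.List.mem_pyRange_iff_of_pos (by omega)] at hm
    obtain ⟨hm1, hm2, hm3⟩ := hm
    have hq2 : 2 ≤ q := hq.1
    have hmp : m = p := by omega
    subst hmp
    refine ⟨q, hq2, by nlinarith, ?_⟩
    obtain ⟨t, ht⟩ := hm3
    exact ⟨t + 2, by linarith [ht]⟩
  · rintro ⟨i, hi2, hip, ⟨k, rfl⟩⟩
    have hk2 : 2 ≤ k := by nlinarith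
    refine ⟨i, ?_, i * k, ?_, rfl⟩
    · rw [PySem.List.mem_pyRange_one]
      exact ⟨hi2, by omega⟩
    · rw [PySem.List.mem_pyRange_iff_of_pos (by omega)]
      exact ⟨by nlinarith, hn, ⟨k - 2, by ring⟩⟩

-- for p in range(2, n): A's is_prime p equals B's sieve entry at p
theorem isPrime_eq_sieve (n p : Int) (h2 : 2 ≤ p) (hn : p < n) :
    is_prime p =
      ((PySem.List.pyRange 2 n 1).foldl
        (fun s q => (PySem.List.pyRange (2 * q) n q).foldl (fun s m => s.set m.toNat false) s)
        (List.replicate n.toNat true)).getD p.toNat false := by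
  have hlen : p.toNat < n.toNat := by omega
  rw [List.getD_eq_getElem?_getD, sieve_getElem? n]
  have hexiff :
      (PySem.List.pyRange 2 n 1).any
          (fun q => (PySem.List.pyRange (2 * q) n q).any (fun m => m.toNat == p.toNat)) = true ↔
        ∃ i, 2 ≤ i ∧ i < p ∧ i ∣ p := by
    rw [← struck_iff n p h2 hn]
    simp [List.any_eq_true]
  by_cases hs : (PySem.List.pyRange 2 n 1).any
      (fun q => (PySem.List.pyRange (2 * q) n q).any (fun m => m.toNat == p.toNat)) = true
  · rw [if_pos hs, map_const_false]
    simp only [List.length_replicate, if_pos hlen]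
    obtain ⟨i, hi2, hip, hdvd⟩ := hexiff.mp hs
    cases hb : isPrimeLoop p (PySem.List.pyRange 2 p 1) with
    | false => simp [is_prime, hb]
    | true =>
      exact absurd hdvd
        ((isPrimeLoop_eq_true_iff p _).mp hb i (PySem.List.mem_pyRange_one.mpr ⟨hi2, hip⟩))
  · rw [if_neg hs, List.getElem?_replicate, if_pos hlen]
    have hall : is_prime p = true := by
      rw [is_prime, isPrimeLoop_eq_true_iff]
      intro i hi hdvd
      rw [PySem.List.mem_pyRange_one] at hi
      exact hs (hexiff.mpr ⟨i, hi.1, hi.2, hdvd⟩)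
    simp [hall]

-- ===== VERDICT (by name: the statement is the Claim_ definition above) =====
theorem hax_spec : Claim_equal_hax := by
  intro n _
  unfold Spec_hax hax hax_alt
  by_cases hn : n ≤ 2
  · rw [if_pos hn, PySem.List.pyRange_one_eq_nil hn, List.foldl_nil]
  · rw [if_neg hn]
    apply PySem.List.foldl_congr_mem
    intro acc p hp
    rw [PySem.List.mem_pyRange_one] at hp
    rw [isPrime_eq_sieve n p hp.1 hp.2]
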